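-- pv_equiv track=rewrite | github.com/ManBearRick/paw-patrol | data.py | split_list_items
-- ===== SOURCE A (Python) =====
-- def split_list_items(items: list[str], sep: str) -> list:
--     split_list = []
--     for item in items:
--         if len(item.split('+')) == 1:
--             split_list.append(item)
--         else:
--             for split_item in item.split('+'):
--                 split_list.append(split_item)
--     return split_list
-- ===== SOURCE B (Python) =====
-- def split_list_items(items: list[str], sep: str) -> list:
--     # Join everything with '+' and split once: the join inserts '+' at each
--     # item boundary, so one global split equals the per-item flatten.
--     return '+'.join(items).split('+') if items else []
-- ===== Notes on version B (the rewrite author's own statement) =====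
-- stated objective: idiomatic
-- what changed: B joins all items into one string with '+' and performs a single global split, instead of A's per-item split with a length test and nested append loops.
import Mathlib
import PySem

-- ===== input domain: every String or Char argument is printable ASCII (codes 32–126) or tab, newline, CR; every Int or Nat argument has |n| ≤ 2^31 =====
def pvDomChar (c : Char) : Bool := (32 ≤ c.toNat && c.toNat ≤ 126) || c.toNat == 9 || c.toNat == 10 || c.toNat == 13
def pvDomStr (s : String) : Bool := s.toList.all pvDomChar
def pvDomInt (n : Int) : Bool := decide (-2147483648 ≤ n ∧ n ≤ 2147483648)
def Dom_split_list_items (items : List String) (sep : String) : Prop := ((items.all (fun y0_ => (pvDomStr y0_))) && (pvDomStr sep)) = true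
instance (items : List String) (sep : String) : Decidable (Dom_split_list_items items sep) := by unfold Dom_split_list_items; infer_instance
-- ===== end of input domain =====

-- B replaces A's per-item split + nested append loops by one join and one global split (idiomatic; same cost).

-- ===== PORT A =====
def split_list_items (items : List String) (sep : String) : List String :=
  items.foldl (fun split_list item =>
    let parts := (PySem.Chars.splitOn item.toList ['+']).map String.ofList
    if parts.length = 1 then
      split_list ++ [item]
    else
      parts.foldl (fun acc split_item => acc ++ [split_item]) split_list) []

-- ===== PORT B =====
def split_list_items_alt (items : List String) (sep : String) : List String :=
  if items = [] then []
  else (PySem.Chars.splitOn (PySem.Str.join "+" items).toList ['+']).map String.ofList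

-- ===== PRECONDITION & SPEC =====
def Spec_split_list_items (items : List String) (sep : String) (out : List String) : Prop := out = split_list_items_alt items sep
instance (items : List String) (sep : String) (out : List String) : Decidable (Spec_split_list_items items sep out) := by unfold Spec_split_list_items; infer_instance

-- ===== CLAIM (what is proved, stated in full; the proofs are below) =====
def Claim_equal_split_list_items : Prop := ∀ (items : List String) (sep : String), Dom_split_list_items items sep → Spec_split_list_items items sep (split_list_items items sep)

-- ===== LEMMAS AND PROOFS =====

-- A clean structural version of splitting a character list on '+'.
def spPlus : List Char → List Char → List (List Char)
  | cur, [] => [cur]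
  | cur, c :: rest => if c = '+' then cur :: spPlus [] rest else spPlus (cur ++ [c]) rest

theorem spPlus_ne_nil (cur l : List Char) : spPlus cur l ≠ [] := by
  cases l with
  | nil => simp [spPlus]
  | cons c rest =>
    simp only [spPlus]
    split
    · simp
    · exact spPlus_ne_nil _ _

theorem go_eq_spPlus : ∀ (fuel : Nat) (l cur : List Char) (accs : List (List Char)),
    l.length < fuel →
    PySem.Chars.splitOn.go ['+'] fuel l cur accs = accs.reverse ++ spPlus cur.reverse l := by
  intro fuel
  induction fuel with
  | zero => intro l cur accs h; omega
  | succ n ih =>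
    intro l cur accs h
    cases l with
    | nil => simp [PySem.Chars.splitOn.go, spPlus]
    | cons c rest =>
      simp only [PySem.Chars.splitOn.go]
      by_cases hc : c = '+'
      · subst hc
        have hpre : List.isPrefixOf ['+'] ('+' :: rest) = true := by
          simp [List.isPrefixOf]
        simp only [hpre, if_pos, List.length_cons, List.length_nil, List.drop_succ_cons,
          List.drop_zero]
        rw [ih rest [] (cur.reverse :: accs) (by simp at h; omega)]
        simp [spPlus]
      · have hpre : List.isPrefixOf ['+'] (c :: rest) = false := by
          simp [List.isPrefixOf]
          exact fun hh => hc hh.symm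
        simp only [hpre, Bool.false_eq_true, if_false]
        rw [ih rest (c :: cur) accs (by simp at h; omega)]
        simp [spPlus, hc]

theorem splitOn_eq_spPlus (l : List Char) : PySem.Chars.splitOn l ['+'] = spPlus [] l := by
  unfold PySem.Chars.splitOn
  rw [go_eq_spPlus (l.length + 1) l [] [] (by omega)]
  simp

theorem spPlus_append (a b cur : List Char) :
    spPlus cur (a ++ '+' :: b) = spPlus cur a ++ spPlus [] b := by
  induction a generalizing cur with
  | nil => simp [spPlus]
  | cons c rest ih =>
    simp only [List.cons_append, spPlus]
    by_cases hc : c = '+' <;> simp [hc, ih]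

theorem spPlus_singleton (cur l r : List Char) (h : spPlus cur l = [r]) : r = cur ++ l := by
  induction l generalizing cur with
  | nil => simp [spPlus] at h; simp [h]
  | cons c rest ih =>
    simp only [spPlus] at h
    by_cases hc : c = '+'
    · simp [hc] at h
      exact absurd h.2 (spPlus_ne_nil _ _)
    · simp [hc] at h
      have := ih (cur ++ [c]) h
      simpa [hc] using this

-- A's fold equals the flatMap of per-item splits.
theorem inner_foldl (parts acc : List String) :
    parts.foldl (fun a p => a ++ [p]) acc = acc ++ parts := by
  induction parts generalizing acc with
  | nil => simp
  | cons p ps ih => simp [List.foldl, ih]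

theorem portA_eq_flatMap (items : List String) (sep : String) :
    split_list_items items sep = items.flatMap (fun item => spPlus [] item.toList |>.map String.ofList) := by
  unfold split_list_items
  have key : ∀ (pre : List String),
      items.foldl (fun split_list item =>
        let parts := (PySem.Chars.splitOn item.toList ['+']).map String.ofList
        if parts.length = 1 then split_list ++ [item]
        else parts.foldl (fun acc split_item => acc ++ [split_item]) split_list) pre
      = pre ++ items.flatMap (fun item => spPlus [] item.toList |>.map String.ofList) := by
    induction items with
    | nil => simp
    | cons it rest ih =>
      intro pre
      simp only [List.foldl, List.flatMap_cons]
      rw [splitOn_eq_spPlus]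
      by_cases h1 : ((spPlus [] it.toList).map String.ofList).length = 1
      · simp only [h1, if_pos]
        rw [ih]
        -- the single part equals the item itself
        have hlen : (spPlus [] it.toList).length = 1 := by simpa using h1
        obtain ⟨r, hr⟩ : ∃ r, spPlus [] it.toList = [r] := by
          cases hsp : spPlus [] it.toList with
          | nil => exact absurd hsp (spPlus_ne_nil _ _)
          | cons x xs =>
            rw [hsp] at hlen
            simp at hlen
            exact ⟨x, by simp [hlen]⟩
        have : r = it.toList := by simpa using spPlus_singleton [] it.toList r hr
        simp [hr, this, List.append_assoc]
      · simp only [h1, if_neg, not_false_iff]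
        rw [inner_foldl, ih, List.append_assoc]
  simpa using key []

-- join-then-split equals the flatMap, for nonempty lists.
theorem split_join (items : List String) (h : items ≠ []) :
    (PySem.Chars.splitOn (PySem.Str.join "+" items).toList ['+']).map String.ofList
      = items.flatMap (fun item => spPlus [] item.toList |>.map String.ofList) := by
  rw [PySem.Str.toList_join, splitOn_eq_spPlus]
  have key : ∀ (ls : List (List Char)), ls ≠ [] →
      spPlus [] (PySem.Chars.join "+".toList ls) = ls.flatMap (fun l => spPlus [] l) := by
    intro ls
    induction ls with
    | nil => intro h; exact absurd rfl h
    | cons x xs ih =>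
      intro _
      cases xs with
      | nil => simp [PySem.Chars.join, List.intercalate]
      | cons y ys =>
        have hx : PySem.Chars.join "+".toList (x :: y :: ys)
            = x ++ '+' :: PySem.Chars.join "+".toList (y :: ys) := by
          simp [PySem.Chars.join, List.intercalate, List.intersperse]
        rw [hx, spPlus_append, ih (by simp)]
        simp
  rw [key (items.map String.toList) (by simpa using h)]
  simp [List.flatMap_map, List.map_flatMap]

-- ===== VERDICT (by name: the statement is the Claim_ definition above) =====
theorem split_list_items_spec : Claim_equal_split_list_items := by
  intro items sep _
  unfold Spec_split_list_items split_list_items_alt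
  by_cases h : items = []
  · subst h; simp [split_list_items]
  · rw [if_neg h, portA_eq_flatMap, split_join items h]
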